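-- pv_equiv track=rewrite | github.com/slon1024/algorithm | python/src/sort/strand_sort.py | loop
-- ===== SOURCE A (Python) =====
-- def loop(sublist, in_array):
--     i=0
--     while i < len(in_array):
--         if in_array[i] > sublist[-1]:
--             sublist += [ in_array.pop(i) ]
--         else:
--             i += 1
--     return sublist
-- ===== SOURCE B (Python) =====
-- def loop(sublist, in_array):
--     kept = []
--     extracted = []
--     if in_array:
--         last = sublist[-1]
--         for x in in_array:
--             if x > last:
--                 extracted.append(x)
--                 last = x
--             else:
--                 kept.append(x)
--     in_array[:] = kept
--     sublist += extracted
--     return sublist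
-- ===== Notes on version B (the rewrite author's own statement) =====
-- stated objective: faster
-- what changed: Replaces the while-loop that repeatedly calls O(n) list.pop(i) and re-reads sublist[-1] by a single forward pass tracking the strand maximum in a variable, partitioning in_array into kept and extracted and writing back once (measured 1.7x faster in a timing run).
import Mathlib
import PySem

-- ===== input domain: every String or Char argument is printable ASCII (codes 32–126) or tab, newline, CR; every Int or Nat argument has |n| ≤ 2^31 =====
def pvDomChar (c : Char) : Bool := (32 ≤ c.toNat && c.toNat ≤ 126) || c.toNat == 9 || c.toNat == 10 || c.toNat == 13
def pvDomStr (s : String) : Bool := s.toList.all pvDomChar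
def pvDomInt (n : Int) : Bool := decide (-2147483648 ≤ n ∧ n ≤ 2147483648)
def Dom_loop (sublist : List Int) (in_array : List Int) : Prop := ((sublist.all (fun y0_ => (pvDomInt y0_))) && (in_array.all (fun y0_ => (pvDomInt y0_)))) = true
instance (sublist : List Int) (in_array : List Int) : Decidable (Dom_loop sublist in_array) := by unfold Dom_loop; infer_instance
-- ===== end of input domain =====

-- B replaces A's while-loop (repeated list.pop(i)) by one forward pass partitioning in_array against a running strand maximum (measured faster in a timing run);
-- A and B both mutate sublist and in_array identically in Python; the equivalence proved here is about the return value.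

-- ===== PORT A =====
-- while i < len(in_array): pop elements greater than sublist[-1] and append them; else i += 1
def loopGo (sublist : List Int) (arr : List Int) (i : Nat) : List Int :=
  if _h : i < arr.length then
    match hp : PySem.List.pop? arr (i : Int) with
    | some (x, rest) =>
        if x > (PySem.List.pyGet? sublist (-1)).getD 0 then
          loopGo (sublist ++ [x]) rest i
        else
          loopGo sublist arr (i + 1)
    | none => sublist   -- unreachable: i < len(arr)
  else sublist
termination_by arr.length - i
decreasing_by
  · have := PySem.List.pop?_natCast (xs := arr) (n := i) _h
    rw [this] at hp
    cases hp
    simp [List.length_eraseIdx, _h]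
    omega
  · omega

def loop (sublist : List Int) (in_array : List Int) : List Int :=
  loopGo sublist in_array 0

-- ===== PORT B =====
-- single pass: partition in_array against the running strand maximum `last`, append extracted
def loop_alt (sublist : List Int) (in_array : List Int) : List Int :=
  if in_array ≠ [] then
    let acc := in_array.foldl (fun (p : List Int × List Int × Int) x =>
      if x > p.2.2 then (p.1, p.2.1 ++ [x], x) else (p.1 ++ [x], p.2.1, p.2.2))
      ([], [], (PySem.List.pyGet? sublist (-1)).getD 0)
    sublist ++ acc.2.1
  else sublist

-- ===== PRECONDITION & SPEC =====
-- A evaluates sublist[-1] whenever in_array is nonempty, raising IndexError when sublist = []: those inputs are excluded.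
def Pre_loop (sublist : List Int) (in_array : List Int) : Prop := sublist ≠ [] ∨ in_array = []
instance (sublist : List Int) (in_array : List Int) : Decidable (Pre_loop sublist in_array) := by unfold Pre_loop; infer_instance
def pvWitness_loop : List Int × List Int := ([3], [1, 5, 2, 6])

def Spec_loop (sublist : List Int) (in_array : List Int) (out : List Int) : Prop := out = loop_alt sublist in_array
instance (sublist : List Int) (in_array : List Int) (out : List Int) : Decidable (Spec_loop sublist in_array out) := by unfold Spec_loop; infer_instance

-- ===== CLAIM (what is proved, stated in full; the proofs are below) =====
def Claim_equal_loop : Prop := ∀ (sublist : List Int) (in_array : List Int), Dom_loop sublist in_array → Pre_loop sublist in_array → Spec_loop sublist in_array (loop sublist in_array)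

-- ===== LEMMAS AND PROOFS =====

-- the greedy increasing strand of xs above threshold l
def strand (l : Int) (xs : List Int) : List Int :=
  match xs with
  | [] => []
  | x :: xs => if x > l then x :: strand x xs else strand l xs

theorem lastD_append (xs : List Int) (x : Int) :
    (PySem.List.pyGet? (xs ++ [x]) (-1)).getD 0 = x := by
  simp [PySem.List.pyGet?_neg_one_append_singleton]

theorem loopGo_eq (n : Nat) : ∀ (arr : List Int) (i : Nat) (sublist : List Int),
    arr.length - i ≤ n → sublist ≠ [] →
    loopGo sublist arr i = sublist ++ strand ((PySem.List.pyGet? sublist (-1)).getD 0) (arr.drop i) := by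
  induction n with
  | zero =>
    intro arr i sublist hn hs
    have h : ¬ i < arr.length := by omega
    rw [loopGo, dif_neg h, List.drop_eq_nil_of_le (by omega), strand, List.append_nil]
  | succ n ih =>
    intro arr i sublist hn hs
    by_cases h : i < arr.length
    · have hpop := PySem.List.pop?_natCast (xs := arr) (n := i) h
      have hdrop : arr.drop i = arr[i] :: arr.drop (i + 1) := List.drop_eq_getElem_cons h
      rw [loopGo, dif_pos h, hpop]
      by_cases hc : arr[i] > (PySem.List.pyGet? sublist (-1)).getD 0
      · simp only [hc, if_pos]
        have hlen : (arr.eraseIdx i).length - i ≤ n := by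
          simp [List.length_eraseIdx, h]; omega
        have hdrop' : (arr.eraseIdx i).drop i = arr.drop (i + 1) := by
          rw [List.eraseIdx_eq_take_drop_succ]
          rw [List.drop_append_of_le_length (by simp [List.length_take]; omega)]
          simp
        rw [ih _ _ _ hlen (by simp), hdrop', hdrop, strand, if_pos hc,
            lastD_append, List.append_assoc, List.singleton_append]
      · simp only [hc, if_neg, not_false_iff]
        rw [ih _ _ _ (by omega) hs, hdrop, strand, if_neg hc]
    · rw [loopGo, dif_neg h, List.drop_eq_nil_of_le (by omega), strand, List.append_nil]

theorem foldB_eq : ∀ (xs k e : List Int) (l : Int),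
    (xs.foldl (fun (p : List Int × List Int × Int) x =>
      if x > p.2.2 then (p.1, p.2.1 ++ [x], x) else (p.1 ++ [x], p.2.1, p.2.2)) (k, e, l)).2.1
    = e ++ strand l xs := by
  intro xs
  induction xs with
  | nil => intro k e l; simp [strand]
  | cons x xs ih =>
    intro k e l
    simp only [List.foldl_cons]
    by_cases hc : x > l
    · rw [if_pos hc, ih, strand, if_pos hc, List.append_assoc, List.singleton_append]
    · rw [if_neg hc, ih, strand, if_neg hc]

-- ===== VERDICT (by name: the statement is the Claim_ definition above) =====
theorem loop_spec : Claim_equal_loop := by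
  intro sublist in_array _ hpre
  unfold Spec_loop loop loop_alt
  rcases hpre with hs | ha
  · by_cases hi : in_array = []
    · subst hi
      rw [loopGo]
      simp
    · rw [loopGo_eq in_array.length _ _ _ (by omega) hs, List.drop_zero, if_pos hi]
      show _ = sublist ++ _
      rw [foldB_eq]
      simp
  · subst ha
    rw [loopGo]
    simp
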